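-- pv_equiv track=rewrite | github.com/mikellykels/Rigging | Rigs/Build/fkik_blend_build.py | match_joints
-- ===== SOURCE A (Python) =====
-- def match_joints(joints):
--     """
--     Match FK, IK, and export joints based on their names.
--
--     Args:
--         joints (list): List of all joint names.
--
--     Returns:
--         tuple: Lists of export, FK, and IK joints.
--     """
--     export_joints = []
--     fk_joints = []
--     ik_joints = []
--
--     for joint in joints:
--         if joint.endswith('_FK'):
--             fk_joints.append(joint)
--         elif joint.endswith('_IK'):
--             ik_joints.append(joint)
--         else:
--             export_joints.append(joint)
--
--     # Sort joints to ensure they're in the same order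
--     export_joints.sort()
--     fk_joints.sort()
--     ik_joints.sort()
--
--     return export_joints, fk_joints, ik_joints
-- ===== SOURCE B (Python) =====
-- def _merge(a, b):
--     """Merge two sorted lists of strings into one sorted list."""
--     out = []
--     i = j = 0
--     while i < len(a) and j < len(b):
--         if a[i] <= b[j]:
--             out.append(a[i]); i += 1
--         else:
--             out.append(b[j]); j += 1
--     out.extend(a[i:])
--     out.extend(b[j:])
--     return out
--
--
-- def match_joints(joints):
--     """Divide-and-conquer: classify single joints at the leaves, then merge the
--     three sorted buckets pairwise on the way up (a three-way merge sort)."""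
--     if not joints:
--         return [], [], []
--     if len(joints) == 1:
--         j = joints[0]
--         if j.endswith('_FK'):
--             return [], [j], []
--         if j.endswith('_IK'):
--             return [], [], [j]
--         return [j], [], []
--     mid = len(joints) // 2
--     e1, f1, i1 = match_joints(joints[:mid])
--     e2, f2, i2 = match_joints(joints[mid:])
--     return _merge(e1, e2), _merge(f1, f2), _merge(i1, i2)
-- ===== Notes on version B (the rewrite author's own statement) =====
-- stated objective: alternative
-- what changed: B replaces A's append-into-buckets loop plus three library sorts with a recursive three-way merge sort: single joints are classified at the leaves and the three sorted buckets are merged pairwise with a hand-written two-pointer merge on the way up.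
import Mathlib
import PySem

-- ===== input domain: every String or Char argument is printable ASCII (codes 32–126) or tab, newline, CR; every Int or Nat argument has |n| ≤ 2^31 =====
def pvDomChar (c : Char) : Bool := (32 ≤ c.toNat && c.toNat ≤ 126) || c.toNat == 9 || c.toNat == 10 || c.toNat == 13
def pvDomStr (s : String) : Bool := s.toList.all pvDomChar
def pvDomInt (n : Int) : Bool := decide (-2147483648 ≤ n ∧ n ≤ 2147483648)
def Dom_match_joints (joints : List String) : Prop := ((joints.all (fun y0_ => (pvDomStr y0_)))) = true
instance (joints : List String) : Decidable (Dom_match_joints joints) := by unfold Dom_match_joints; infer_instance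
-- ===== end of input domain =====

-- B replaces A's partition-loop-plus-three-sorts with a recursive three-way merge sort
-- (classify at the leaves, merge sorted buckets pairwise): alternative algorithm, same cost.


-- ===== PORT A =====
-- the for-loop: three accumulator lists, appended to in branch order
def matchJointsLoop (acc : List String × List String × List String) (joints : List String) :
    List String × List String × List String :=
  joints.foldl (fun acc j =>
    if PySem.Str.endswith j "_FK" then (acc.1, acc.2.1 ++ [j], acc.2.2)
    else if PySem.Str.endswith j "_IK" then (acc.1, acc.2.1, acc.2.2 ++ [j])
    else (acc.1 ++ [j], acc.2.1, acc.2.2)) acc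

def match_joints (joints : List String) : List String × List String × List String :=
  let acc := matchJointsLoop ([], [], []) joints
  (PySem.List.sorted acc.1 (fun x => x) false,
   PySem.List.sorted acc.2.1 (fun x => x) false,
   PySem.List.sorted acc.2.2 (fun x => x) false)

-- ===== PORT B =====
-- _merge: the two-pointer merge of two sorted lists, transcribed as the standard
-- structural recursion over the two fronts (the trailing extends are the base cases)
def mergeS : List String → List String → List String
  | [], b => b
  | a, [] => a
  | x :: xs, y :: ys =>
      if x ≤ y then x :: mergeS xs (y :: ys) else y :: mergeS (x :: xs) ys

-- joints[:mid] / joints[mid:] with 0 ≤ mid ≤ len are exactly take/drop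
def match_joints_alt (joints : List String) : List String × List String × List String :=
  match joints with
  | [] => ([], [], [])
  | [j] =>
      if PySem.Str.endswith j "_FK" then ([], [j], [])
      else if PySem.Str.endswith j "_IK" then ([], [], [j])
      else ([j], [], [])
  | j0 :: j1 :: rest =>
      let joints := j0 :: j1 :: rest
      let mid := joints.length / 2
      let r1 := match_joints_alt (joints.take mid)
      let r2 := match_joints_alt (joints.drop mid)
      (mergeS r1.1 r2.1, mergeS r1.2.1 r2.2.1, mergeS r1.2.2 r2.2.2)
  termination_by joints.length
  decreasing_by
  · simp [List.length_take]; omega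
  · simp [List.length_drop]; omega

-- ===== PRECONDITION & SPEC =====
def Spec_match_joints (joints : List String) (out : List String × List String × List String) : Prop := out = match_joints_alt joints
instance (joints : List String) (out : List String × List String × List String) : Decidable (Spec_match_joints joints out) := by unfold Spec_match_joints; infer_instance

-- ===== CLAIM (what is proved, stated in full; the proofs are below) =====
def Claim_equal_match_joints : Prop := ∀ (joints : List String), Dom_match_joints joints → Spec_match_joints joints (match_joints joints)

-- ===== LEMMAS AND PROOFS =====
-- the loop's three accumulators are the three filters, appended to the initial state
theorem matchJointsLoop_eq (joints : List String) (acc : List String × List String × List String) :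
    matchJointsLoop acc joints =
      (acc.1 ++ joints.filter (fun j => !PySem.Str.endswith j "_FK" && !PySem.Str.endswith j "_IK"),
       acc.2.1 ++ joints.filter (fun j => PySem.Str.endswith j "_FK"),
       acc.2.2 ++ joints.filter (fun j => !PySem.Str.endswith j "_FK" && PySem.Str.endswith j "_IK")) := by
  induction joints generalizing acc with
  | nil => simp [matchJointsLoop]
  | cons j t ih =>
    simp only [matchJointsLoop, List.foldl_cons] at *
    rw [ih]
    split_ifs with hF hI
    · simp only [List.filter_cons, hF]
      simp
    · simp only [List.filter_cons]
      simp [PySem.Str.endswith_eq] at hF hI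
      simp [hF, hI]
    · simp only [List.filter_cons]
      simp [PySem.Str.endswith_eq] at hF hI
      simp [hF, hI]

theorem mergeS_perm : ∀ (a b : List String), (mergeS a b).Perm (a ++ b) := by
  intro a
  induction a with
  | nil => intro b; simp [mergeS]
  | cons x xs ih =>
    intro b
    induction b with
    | nil => simp [mergeS]
    | cons y ys ihb =>
      rw [mergeS]
      split_ifs with h
      · exact (ih (y :: ys)).cons x
      · exact (ihb.cons y).trans (List.perm_middle (a := y) (l₁ := x :: xs) (l₂ := ys)).symm

theorem mem_mergeS {z : String} (a b : List String) :
    z ∈ mergeS a b ↔ z ∈ a ∨ z ∈ b := by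
  rw [(mergeS_perm a b).mem_iff]; simp

theorem mergeS_pairwise : ∀ (a b : List String),
    a.Pairwise (· ≤ ·) → b.Pairwise (· ≤ ·) → (mergeS a b).Pairwise (· ≤ ·) := by
  intro a
  induction a with
  | nil => intro b _ hb; simpa [mergeS] using hb
  | cons x xs ih =>
    intro b ha
    induction b with
    | nil => intro _; simpa [mergeS] using ha
    | cons y ys ihb =>
      intro hb
      obtain ⟨hax, haxs⟩ := List.pairwise_cons.mp ha
      obtain ⟨hby, hbys⟩ := List.pairwise_cons.mp hb
      rw [mergeS]
      split_ifs with h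
      · refine List.pairwise_cons.mpr ⟨?_, ih (y :: ys) haxs hb⟩
        intro z hz
        rcases (mem_mergeS xs (y :: ys)).mp hz with hz | hz
        · exact hax z hz
        · rcases List.mem_cons.mp hz with rfl | hz
          · exact h
          · exact le_trans h (hby z hz)
      · have hyx : y ≤ x := le_of_not_ge h
        refine List.pairwise_cons.mpr ⟨?_, ihb hbys⟩
        intro z hz
        rcases (mem_mergeS (x :: xs) ys).mp hz with hz | hz
        · rcases List.mem_cons.mp hz with rfl | hz
          · exact hyx
          · exact le_trans hyx (hax z hz)
        · exact hby z hz

-- the three bucket predicates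
def pFK (j : String) : Bool := PySem.Str.endswith j "_FK"
def pIK (j : String) : Bool := !PySem.Str.endswith j "_FK" && PySem.Str.endswith j "_IK"
def pEX (j : String) : Bool := !PySem.Str.endswith j "_FK" && !PySem.Str.endswith j "_IK"

-- B's result: each bucket is a sorted permutation of the corresponding filter
theorem alt_spec : ∀ (joints : List String),
    ((match_joints_alt joints).1.Perm (joints.filter pEX) ∧ (match_joints_alt joints).1.Pairwise (· ≤ ·)) ∧
    ((match_joints_alt joints).2.1.Perm (joints.filter pFK) ∧ (match_joints_alt joints).2.1.Pairwise (· ≤ ·)) ∧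
    ((match_joints_alt joints).2.2.Perm (joints.filter pIK) ∧ (match_joints_alt joints).2.2.Pairwise (· ≤ ·)) := by
  intro joints
  induction joints using match_joints_alt.induct with
  | case1 => simp [match_joints_alt]
  | case2 j hF =>
    rw [match_joints_alt, if_pos hF]
    simp [pEX, pFK, pIK, PySem.Str.endswith] at hF ⊢
    simp [List.filter_cons, pFK, pEX, pIK, PySem.Str.endswith, hF]
  | case3 j hF hI =>
    rw [match_joints_alt, if_neg hF, if_pos hI]
    simp [pEX, pFK, pIK, PySem.Str.endswith] at hF hI ⊢
    simp [List.filter_cons, pFK, pEX, pIK, PySem.Str.endswith, hF, hI]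
  | case4 j hF hI =>
    rw [match_joints_alt, if_neg hF, if_neg hI]
    simp [pEX, pFK, pIK, PySem.Str.endswith] at hF hI ⊢
    simp [List.filter_cons, pFK, pEX, pIK, PySem.Str.endswith, hF, hI]
  | case5 j0 j1 rest L M ih1 ih2 =>
    rw [match_joints_alt]
    dsimp only
    have hsplit : (j0 :: j1 :: rest).take ((j0 :: j1 :: rest).length / 2) ++
        (j0 :: j1 :: rest).drop ((j0 :: j1 :: rest).length / 2) = j0 :: j1 :: rest :=
      List.take_append_drop _ _
    have hEX := (mergeS_perm _ _).trans (ih1.1.1.append ih2.1.1)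
    have hFK := (mergeS_perm _ _).trans (ih1.2.1.1.append ih2.2.1.1)
    have hIK := (mergeS_perm _ _).trans (ih1.2.2.1.append ih2.2.2.1)
    rw [← List.filter_append, hsplit] at hEX hFK hIK
    exact ⟨⟨hEX, mergeS_pairwise _ _ ih1.1.2 ih2.1.2⟩,
           ⟨hFK, mergeS_pairwise _ _ ih1.2.1.2 ih2.2.1.2⟩,
           ⟨hIK, mergeS_pairwise _ _ ih1.2.2.2 ih2.2.2.2⟩⟩

-- ===== VERDICT (by name: the statement is the Claim_ definition above) =====
theorem match_joints_spec : Claim_equal_match_joints := by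
  intro joints _
  unfold Spec_match_joints match_joints
  rw [matchJointsLoop_eq]
  have h := alt_spec joints
  simp only [List.nil_append]
  rw [show (fun j => !PySem.Str.endswith j "_FK" && !PySem.Str.endswith j "_IK") = pEX from rfl,
      show (fun j => PySem.Str.endswith j "_FK") = pFK from rfl,
      show (fun j => !PySem.Str.endswith j "_FK" && PySem.Str.endswith j "_IK") = pIK from rfl,
      PySem.List.sorted_id_eq_of_perm_of_pairwise _ _ h.1.1 h.1.2,
      PySem.List.sorted_id_eq_of_perm_of_pairwise _ _ h.2.1.1 h.2.1.2,
      PySem.List.sorted_id_eq_of_perm_of_pairwise _ _ h.2.2.1 h.2.2.2]
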